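-- pv_equiv track=rewrite | github.com/derekwisong/pyagent | pyagent/plugins/memory_markdown/__init__.py | _insert_index_bullet
-- ===== SOURCE A (Python) =====
-- def _insert_index_bullet(
--     index_text: str, category: str, bullet: str
-- ) -> str:
--     """Insert `bullet` under `## <category>` in `index_text`.
--
--     Match category case-insensitively against existing H2 headings.
--     If the heading is absent, append a new `## <category>` section
--     at the end of the file. Strips the `(no memories yet)` seed
--     placeholder if present. Returns the new full text.
--     """
--     lines = [
--         ln for ln in index_text.splitlines()
--         if ln.strip() != "(no memories yet)"
--     ]
--
--     target_idx = None
--     for i, line in enumerate(lines):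
--         stripped = line.lstrip()
--         if stripped.startswith("## "):
--             heading = stripped[3:].strip()
--             if heading.lower() == category.lower():
--                 target_idx = i
--                 break
--
--     if target_idx is not None:
--         # Find end of this section: next H2, or EOF.
--         insert_at = len(lines)
--         for j in range(target_idx + 1, len(lines)):
--             if lines[j].lstrip().startswith("## "):
--                 insert_at = j
--                 break
--         # Step back past trailing blanks so bullets cluster directly
--         # under the heading.
--         while (
--             insert_at > target_idx + 1
--             and lines[insert_at - 1].strip() == ""
--         ):
--             insert_at -= 1
--         lines.insert(insert_at, bullet)
--     else:
--         # New category goes at the end.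
--         while lines and lines[-1].strip() == "":
--             lines.pop()
--         if lines:
--             lines.append("")
--         lines.append(f"## {category}")
--         lines.append(bullet)
--
--     text = "\n".join(lines)
--     if not text.endswith("\n"):
--         text += "\n"
--     return text
-- ===== SOURCE B (Python) =====
-- def _insert_index_bullet(
--     index_text: str, category: str, bullet: str
-- ) -> str:
--     """Recursive single-pass variant: walk the lines once; at the first
--     matching H2 heading splice the bullet before the trailing blank run of
--     that section's body; otherwise append a fresh section at the end."""
--
--     def _is_h2(ln):
--         return ln.lstrip().startswith("## ")
--
--     def _matches(ln):
--         s = ln.lstrip()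
--         return s.startswith("## ") and s[3:].strip().lower() == category.lower()
--
--     def _split_at_h2(xs):
--         # (body up to the next H2 heading, rest from that heading on)
--         if xs and not _is_h2(xs[0]):
--             body, tail = _split_at_h2(xs[1:])
--             return [xs[0]] + body, tail
--         return [], xs
--
--     def _split_trailing_blanks(xs):
--         # (xs without its trailing run of blank lines, that blank run)
--         if not xs:
--             return [], []
--         keep, blanks = _split_trailing_blanks(xs[1:])
--         if not keep and xs[0].strip() == "":
--             return [], [xs[0]] + blanks
--         return [xs[0]] + keep, blanks
--
--     def _go(ls):
--         # lines with bullet inserted under the first matching heading, or None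
--         if not ls:
--             return None
--         head, rest = ls[0], ls[1:]
--         if _matches(head):
--             body, tail = _split_at_h2(rest)
--             keep, blanks = _split_trailing_blanks(body)
--             return [head] + keep + [bullet] + blanks + tail
--         sub = _go(rest)
--         return None if sub is None else [head] + sub
--
--     lines = [
--         ln for ln in index_text.splitlines()
--         if ln.strip() != "(no memories yet)"
--     ]
--     out = _go(lines)
--     if out is None:
--         kept, _ = _split_trailing_blanks(lines)
--         out = kept + ([""] if kept else []) + ["## " + category, bullet]
--     text = "\n".join(out)
--     return text if text.endswith("\n") else text + "\n"
-- ===== Notes on version B (the rewrite author's own statement) =====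
-- stated objective: alternative
-- what changed: A locates the heading with enumerate, scans forward over indices for the next H2, steps an insertion index back through a while loop and calls list.insert, then pops trailing blanks in place; B is one structural recursion over the lines that splices the bullet where it walks, using recursive (body, next-section) and (kept, trailing-blank-run) list splits instead of any index arithmetic.
import Mathlib
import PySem

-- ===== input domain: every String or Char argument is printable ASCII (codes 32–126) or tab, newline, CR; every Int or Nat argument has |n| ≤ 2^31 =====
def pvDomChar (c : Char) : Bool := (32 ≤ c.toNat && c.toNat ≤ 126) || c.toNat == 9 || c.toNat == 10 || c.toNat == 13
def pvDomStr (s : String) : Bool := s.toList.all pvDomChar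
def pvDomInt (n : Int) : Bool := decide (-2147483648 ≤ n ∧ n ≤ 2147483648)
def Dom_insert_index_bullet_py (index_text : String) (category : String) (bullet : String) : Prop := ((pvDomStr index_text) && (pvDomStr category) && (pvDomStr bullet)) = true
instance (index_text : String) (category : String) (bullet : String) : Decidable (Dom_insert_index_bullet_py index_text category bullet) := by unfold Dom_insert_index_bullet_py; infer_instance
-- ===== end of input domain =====

-- B replaces A's index bookkeeping (enumerate/range scans, a while loop stepping an
-- insertion index back, list.insert) by one structural recursion over the lines that
-- splices the bullet in place; objective: alternative decomposition, same cost.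

-- Shared line predicates (identical text in both Pythons):
-- line.strip() == ""
def pvBlank (l : String) : Bool := PySem.Str.strip l == ""
-- line.lstrip().startswith("## ")
def pvH2 (l : String) : Bool := PySem.Str.startswith (PySem.Str.lstrip l) "## "
-- stripped.startswith("## ") and stripped[3:].strip().lower() == category.lower()
def pvMatch (category : String) (l : String) : Bool :=
  let stripped := PySem.Str.lstrip l
  PySem.Str.startswith stripped "## " &&
    (PySem.Str.lower (PySem.Str.strip (PySem.Str.slice stripped (some 3) none)) ==
      PySem.Str.lower category)

-- ===== PORT A =====
-- 'for i, line in enumerate(lines): … break' — first index whose line matches, else None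
def pvFindTargetA (category : String) (lines : List String) : Option Nat :=
  lines.findIdx? (pvMatch category)

-- 'insert_at = len(lines); for j in range(target_idx+1, len(lines)): if …: insert_at = j; break'
def pvInsertAt0A (lines : List String) (t : Nat) : Nat :=
  match (lines.drop (t + 1)).findIdx? pvH2 with
  | some k => t + 1 + k
  | none => lines.length

-- 'while insert_at > target_idx + 1 and lines[insert_at-1].strip() == "": insert_at -= 1'
-- (lines[insert_at-1] is always in range when called; getD's default is never used)
def pvStepBackA (lines : List String) (t : Nat) : Nat → Nat
  | 0 => 0
  | k + 1 => if t + 1 < k + 1 && pvBlank (lines.getD k "") then pvStepBackA lines t k else k + 1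

-- 'while lines and lines[-1].strip() == "": lines.pop()'
def pvPopBlanksA (ls : List String) : List String :=
  match h : ls.getLast? with
  | none => ls
  | some l => if pvBlank l then pvPopBlanksA ls.dropLast else ls
termination_by ls.length
decreasing_by
  have : ls ≠ [] := by intro hnil; rw [hnil] at h; simp at h
  have := List.length_pos_of_ne_nil this
  simp [List.length_dropLast]; omega

def pvCoreA (category bullet : String) (lines : List String) : List String :=
  match pvFindTargetA category lines with
  | some t =>
    -- lines.insert(insert_at, bullet) with 0 ≤ insert_at ≤ len(lines): take/drop splice
    let ia := pvStepBackA lines t (pvInsertAt0A lines t)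
    lines.take ia ++ bullet :: lines.drop ia
  | none =>
    let ls := pvPopBlanksA lines
    (if ls.isEmpty then ls else ls ++ [""]) ++ ["## " ++ category, bullet]

def insert_index_bullet_py (index_text : String) (category : String) (bullet : String) : String :=
  let lines := (PySem.Str.splitlines index_text).filter
    (fun ln => !(PySem.Str.strip ln == "(no memories yet)"))
  let text := PySem.Str.join "\n" (pvCoreA category bullet lines)
  if PySem.Str.endswith text "\n" then text else text ++ "\n"

-- ===== PORT B =====
-- _split_at_h2: (body up to the next H2 heading, rest from that heading on)
def pvSplitAtH2B : List String → List String × List String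
  | [] => ([], [])
  | x :: xs =>
    if pvH2 x then ([], x :: xs)
    else
      let (body, tail) := pvSplitAtH2B xs
      (x :: body, tail)

-- _split_trailing_blanks: (xs without its trailing blank run, that blank run)
def pvSplitTBB : List String → List String × List String
  | [] => ([], [])
  | x :: xs =>
    let (keep, blanks) := pvSplitTBB xs
    if keep.isEmpty && pvBlank x then ([], x :: blanks) else (x :: keep, blanks)

-- _go: lines with the bullet inserted under the first matching heading, or None
def pvGoB (category bullet : String) : List String → Option (List String)
  | [] => none
  | l :: rest =>
    if pvMatch category l then
      let bt := pvSplitAtH2B rest          -- (body, tail)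
      let kb := pvSplitTBB bt.1            -- (keep, blanks)
      some (l :: (kb.1 ++ bullet :: (kb.2 ++ bt.2)))
    else (pvGoB category bullet rest).map (l :: ·)

def insert_index_bullet_py_alt (index_text : String) (category : String) (bullet : String) : String :=
  let lines := (PySem.Str.splitlines index_text).filter
    (fun ln => !(PySem.Str.strip ln == "(no memories yet)"))
  let out :=
    match pvGoB category bullet lines with
    | some o => o
    | none =>
      let kept := (pvSplitTBB lines).1
      kept ++ (if kept.isEmpty then [] else [""]) ++ ["## " ++ category, bullet]
  let text := PySem.Str.join "\n" out
  if PySem.Str.endswith text "\n" then text else text ++ "\n"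

-- ===== PRECONDITION & SPEC =====
def Spec_insert_index_bullet_py (index_text : String) (category : String) (bullet : String) (out : String) : Prop := out = insert_index_bullet_py_alt index_text category bullet
instance (index_text : String) (category : String) (bullet : String) (out : String) : Decidable (Spec_insert_index_bullet_py index_text category bullet out) := by unfold Spec_insert_index_bullet_py; infer_instance

-- ===== CLAIM (what is proved, stated in full; the proofs are below) =====
def Claim_equal_insert_index_bullet_py : Prop := ∀ (index_text : String) (category : String) (bullet : String), Dom_insert_index_bullet_py index_text category bullet → Spec_insert_index_bullet_py index_text category bullet (insert_index_bullet_py index_text category bullet)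

-- ===== LEMMAS AND PROOFS =====

-- pvSplitTBB, in closed form on the reversed list
theorem pvSplitTBB_eq (ls : List String) :
    pvSplitTBB ls =
      ((ls.reverse.dropWhile pvBlank).reverse, (ls.reverse.takeWhile pvBlank).reverse) := by
  induction ls with
  | nil => simp [pvSplitTBB]
  | cons x xs ih =>
    have hsplit := List.takeWhile_append_dropWhile (p := pvBlank) (l := xs.reverse)
    simp only [pvSplitTBB, ih, List.reverse_cons, List.dropWhile_append, List.takeWhile_append]
    by_cases hk : List.dropWhile pvBlank xs.reverse = []
    · have htw : List.takeWhile pvBlank xs.reverse = xs.reverse := by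
        rw [hk, List.append_nil] at hsplit; exact hsplit
      by_cases hb : pvBlank x
      · simp [hk, hb, htw, List.dropWhile, List.takeWhile]
      · simp [hk, hb, htw, List.dropWhile, List.takeWhile]
    · have hlen : (List.takeWhile pvBlank xs.reverse).length ≠ xs.reverse.length := by
        intro hEq
        have h1 := congrArg List.length hsplit
        simp only [List.length_append] at h1
        have : (List.dropWhile pvBlank xs.reverse).length = 0 := by omega
        exact hk (List.length_eq_zero_iff.mp this)
      have hlen' : (List.takeWhile pvBlank xs.reverse).length ≠ xs.length := by
        simpa using hlen
      simp [hk, hlen', List.isEmpty_iff]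

theorem pvSplitTBB_append (ls : List String) :
    (pvSplitTBB ls).1 ++ (pvSplitTBB ls).2 = ls := by
  simp only [pvSplitTBB_eq, ← List.reverse_append, List.takeWhile_append_dropWhile,
    List.reverse_reverse]

theorem pvPopBlanksA_eq_splitTBB (ls : List String) :
    pvPopBlanksA ls = (pvSplitTBB ls).1 := by
  rw [pvSplitTBB_eq]
  show pvPopBlanksA ls = (ls.reverse.dropWhile pvBlank).reverse
  induction ls using List.reverseRecOn with
  | nil => simp [pvPopBlanksA]
  | append_singleton ys y ih =>
    rw [pvPopBlanksA]
    split
    · rename_i hnone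
      simp at hnone
    · rename_i l hsome
      rw [List.getLast?_concat] at hsome
      cases hsome
      rw [List.dropLast_concat]
      by_cases hb : pvBlank y
      · rw [if_pos hb, ih]
        simp [hb]
      · rw [if_neg hb]
        simp [hb]

theorem pvSplitAtH2B_eq (xs : List String) :
    pvSplitAtH2B xs = (xs.takeWhile (fun l => !pvH2 l), xs.dropWhile (fun l => !pvH2 l)) := by
  induction xs with
  | nil => simp [pvSplitAtH2B]
  | cons x xs ih =>
    by_cases h : pvH2 x <;> simp [pvSplitAtH2B, h, ih]

theorem pvGoB_eq_none_iff (c b : String) (ls : List String) :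
    pvGoB c b ls = none ↔ ls.findIdx? (pvMatch c) = none := by
  induction ls with
  | nil => simp [pvGoB]
  | cons x xs ih =>
    by_cases h : pvMatch c x <;> simp [pvGoB, List.findIdx?_cons, h, ih]

theorem pvInsertAt0A_cons_zero (x : String) (xs : List String) :
    pvInsertAt0A (x :: xs) 0 = (pvSplitAtH2B xs).1.length + 1 := by
  have key : ∀ (p : String → Bool) (zs : List String),
      (zs.takeWhile (fun a => !p a)).length = ((zs.findIdx? p).getD zs.length) := by
    intro p zs
    induction zs with
    | nil => simp
    | cons z zs ih =>
      by_cases h : p z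
      · simp [List.findIdx?_cons, h]
      · cases hfi : zs.findIdx? p <;>
          simp [List.findIdx?_cons, h, ih, hfi]
  unfold pvInsertAt0A
  rw [pvSplitAtH2B_eq]
  have hdrop : (x :: xs).drop (0 + 1) = xs := by simp
  rw [hdrop]
  have := key pvH2 xs
  cases hfi : xs.findIdx? pvH2 <;> simp [hfi] at this ⊢ <;> omega

theorem pvInsertAt0A_cons_succ (x : String) (xs : List String) (t : Nat) :
    pvInsertAt0A (x :: xs) (t + 1) = pvInsertAt0A xs t + 1 := by
  unfold pvInsertAt0A
  have hdrop : (x :: xs).drop (t + 1 + 1) = xs.drop (t + 1) := by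
    simp [List.drop_succ_cons]
  rw [hdrop]
  cases hfi : (xs.drop (t + 1)).findIdx? pvH2 <;> simp [hfi] <;> omega

theorem pvStepBackA_cons_succ (x : String) (xs : List String) (t k : Nat) :
    pvStepBackA (x :: xs) (t + 1) (k + 1) = pvStepBackA xs t k + 1 := by
  induction k with
  | zero => simp [pvStepBackA]
  | succ m ih =>
    conv_lhs => rw [pvStepBackA]
    conv_rhs => rw [pvStepBackA]
    simp only [List.getD_cons_succ, Bool.and_eq_true, decide_eq_true_eq,
      Nat.add_lt_add_iff_right]
    split_ifs with hA
    · exact ih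
    · rfl

theorem pvStepBackA_zero_body (x : String) (body tail : List String) :
    pvStepBackA (x :: (body ++ tail)) 0 (body.length + 1) = (pvSplitTBB body).1.length + 1 := by
  induction body using List.reverseRecOn generalizing tail with
  | nil => simp [pvStepBackA, pvSplitTBB]
  | append_singleton ys y ih =>
    have hget : (x :: (ys ++ [y] ++ tail)).getD (ys.length + 1) "" = y := by
      rw [List.getD_cons_succ]
      rw [List.append_assoc, List.getD_eq_getElem?_getD, List.getElem?_append_right (le_refl _)]
      simp
    rw [List.length_append, List.length_singleton, pvStepBackA]
    rw [hget]
    have hlt : 0 + 1 < ys.length + 1 + 1 := by omega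
    by_cases hb : pvBlank y
    · rw [if_pos (by simp [hlt, hb])]
      have hassoc : ys ++ [y] ++ tail = ys ++ (y :: tail) := by simp
      rw [hassoc]
      rw [ih (y :: tail)]
      have : (pvSplitTBB (ys ++ [y])).1 = (pvSplitTBB ys).1 := by
        simp [pvSplitTBB_eq, hb]
      rw [this]
    · rw [if_neg (by simp [hb])]
      have : (pvSplitTBB (ys ++ [y])).1 = ys ++ [y] := by
        simp [pvSplitTBB_eq, hb]
      rw [this]
      simp

theorem pvGoB_found (c b : String) (ls : List String) (t : Nat)
    (h : ls.findIdx? (pvMatch c) = some t) :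
    pvGoB c b ls =
      some (ls.take (pvStepBackA ls t (pvInsertAt0A ls t)) ++
            b :: ls.drop (pvStepBackA ls t (pvInsertAt0A ls t))) := by
  induction ls generalizing t with
  | nil => simp at h
  | cons x xs ih =>
    rw [List.findIdx?_cons] at h
    by_cases hm : pvMatch c x
    · rw [if_pos hm] at h
      obtain rfl : 0 = t := Option.some.inj h
      have hxs : (pvSplitAtH2B xs).1 ++ (pvSplitAtH2B xs).2 = xs := by
        rw [pvSplitAtH2B_eq]; exact List.takeWhile_append_dropWhile
      have hia0 := pvInsertAt0A_cons_zero x xs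
      have hkb := pvSplitTBB_append (pvSplitAtH2B xs).1
      set body := (pvSplitAtH2B xs).1 with hbody
      set tail := (pvSplitAtH2B xs).2 with htail
      set keep := (pvSplitTBB body).1 with hkeep
      set blanks := (pvSplitTBB body).2 with hblanks
      have hsb : pvStepBackA (x :: xs) 0 (pvInsertAt0A (x :: xs) 0) = keep.length + 1 := by
        rw [hia0]
        have := pvStepBackA_zero_body x body tail
        rw [hxs] at this
        exact this
      have hxs2 : xs = keep ++ (blanks ++ tail) := by
        rw [← List.append_assoc, hkb, hxs]
      rw [hsb, List.take_succ_cons, List.drop_succ_cons]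
      conv_rhs => rw [hxs2]
      rw [List.take_left, List.drop_left]
      simp only [pvGoB, hm, if_true]
      rw [← hbody, ← hkeep, ← hblanks, ← htail, List.cons_append]
    · rw [if_neg hm] at h
      cases hfi : xs.findIdx? (pvMatch c) with
      | none => rw [hfi] at h; simp at h
      | some t' =>
        rw [hfi] at h
        obtain rfl : t' + 1 = t := by simpa using h
        rw [pvInsertAt0A_cons_succ, pvStepBackA_cons_succ,
          List.take_succ_cons, List.drop_succ_cons]
        simp [pvGoB, hm, ih t' hfi]

theorem pvCore_eq (c b : String) (ls : List String) :
    pvCoreA c b ls =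
      (match pvGoB c b ls with
       | some o => o
       | none =>
         let kept := (pvSplitTBB ls).1
         kept ++ (if kept.isEmpty then [] else [""]) ++ ["## " ++ c, b]) := by
  unfold pvCoreA pvFindTargetA
  cases hf : ls.findIdx? (pvMatch c) with
  | none =>
    rw [(pvGoB_eq_none_iff c b ls).mpr hf]
    rw [pvPopBlanksA_eq_splitTBB]
    by_cases he : (pvSplitTBB ls).1.isEmpty
    · have : (pvSplitTBB ls).1 = [] := List.isEmpty_iff.mp he
      simp [this]
    · simp [he]
  | some t =>
    rw [pvGoB_found c b ls t hf]

-- ===== VERDICT (by name: the statement is the Claim_ definition above) =====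
theorem insert_index_bullet_py_spec : Claim_equal_insert_index_bullet_py := by
  intro it c b _
  unfold Spec_insert_index_bullet_py insert_index_bullet_py insert_index_bullet_py_alt
  simp only [pvCore_eq, List.append_assoc]
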